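-- pv_equiv track=rewrite | github.com/JoshuaOliphant/digital-garden | app/services/backlink_service.py | _extract_link_context
-- ===== SOURCE A (Python) =====
-- def _extract_link_context(content: str, link: str, target_slug: str) -> str:
--     """Extract context around a link in content."""
--     try:
--         # Find the link in content and return surrounding text
--         lines = content.split("\n")
--         for line in lines:
--             if link in line or target_slug in line:
--                 return line.strip()[:100]  # Return first 100 chars of line
--         return ""
--     except Exception:
--         return ""
-- ===== SOURCE B (Python) =====
-- def _extract_link_context(content: str, link: str, target_slug: str) -> str:
--     """Extract context around a link in content."""
--     # A pattern containing a newline can never occur inside a single line.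
--     p1 = content.find(link) if "\n" not in link else -1
--     p2 = content.find(target_slug) if "\n" not in target_slug else -1
--     if p1 == -1:
--         pos = p2
--     elif p2 == -1:
--         pos = p1
--     else:
--         pos = min(p1, p2)
--     if pos == -1:
--         return ""
--     start = content.rfind("\n", 0, pos) + 1
--     end = content.find("\n", pos)
--     if end == -1:
--         end = len(content)
--     return content[start:end].strip()[:100]
-- ===== Notes on version B (the rewrite author's own statement) =====
-- stated objective: alternative
-- what changed: B replaces A's split-the-whole-content-into-lines-and-scan loop by two direct substring searches (str.find for link and target_slug, taking the smaller found offset) plus an rfind/find pair that slices the enclosing line straight out of the raw string.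
import Mathlib
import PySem

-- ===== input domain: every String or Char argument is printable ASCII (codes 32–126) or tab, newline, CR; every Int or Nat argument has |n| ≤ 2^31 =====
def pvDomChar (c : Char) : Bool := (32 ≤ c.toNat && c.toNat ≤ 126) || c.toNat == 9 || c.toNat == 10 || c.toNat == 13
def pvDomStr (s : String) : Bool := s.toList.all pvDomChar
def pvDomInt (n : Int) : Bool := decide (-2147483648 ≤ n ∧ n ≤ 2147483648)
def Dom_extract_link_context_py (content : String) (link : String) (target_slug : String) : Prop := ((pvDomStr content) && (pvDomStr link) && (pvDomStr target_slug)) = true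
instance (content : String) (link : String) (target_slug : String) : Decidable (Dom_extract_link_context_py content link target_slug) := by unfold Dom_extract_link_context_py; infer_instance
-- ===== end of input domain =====

-- B replaces A's split-into-lines-and-scan with two substring searches (find) plus a
-- rfind/find pair that cuts the enclosing line out of the raw string; same return value.

-- ===== PORT A =====
-- A's loop 'for line in lines: if link in line or target_slug in line: return line.strip()[:100]'
def pvLoopA (l t : List Char) : List (List Char) → List Char
  | [] => []
  | line :: rest =>
    if PySem.Chars.isIn l line || PySem.Chars.isIn t line then
      PySem.List.slice (PySem.Chars.strip line) none (some 100)
    else pvLoopA l t rest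

def extract_link_context_py (content : String) (link : String) (target_slug : String) : String :=
  String.ofList (pvLoopA link.toList target_slug.toList (PySem.Chars.splitOn content.toList ['\n']))

-- ===== PORT B =====
def pvBcore (c l t : List Char) : List Char :=
  let p1 : Int := if PySem.Chars.isIn ['\n'] l then -1 else PySem.Chars.find c l
  let p2 : Int := if PySem.Chars.isIn ['\n'] t then -1 else PySem.Chars.find c t
  let pos : Int := if p1 = -1 then p2 else if p2 = -1 then p1 else min p1 p2
  if pos = -1 then []
  else
    let start := PySem.Chars.rfindFrom c ['\n'] 0 (some pos) + 1
    let e0 := PySem.Chars.findFrom c ['\n'] pos none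
    let e : Int := if e0 = -1 then (c.length : Int) else e0
    PySem.List.slice (PySem.Chars.strip (PySem.List.slice c (some start) (some e))) none (some 100)

def extract_link_context_py_alt (content : String) (link : String) (target_slug : String) : String :=
  String.ofList (pvBcore content.toList link.toList target_slug.toList)

-- ===== PRECONDITION & SPEC =====
def Spec_extract_link_context_py (content : String) (link : String) (target_slug : String) (out : String) : Prop := out = extract_link_context_py_alt content link target_slug
instance (content : String) (link : String) (target_slug : String) (out : String) : Decidable (Spec_extract_link_context_py content link target_slug out) := by unfold Spec_extract_link_context_py; infer_instance

-- ===== CLAIM (what is proved, stated in full; the proofs are below) =====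
def Claim_equal_extract_link_context_py : Prop := ∀ (content : String) (link : String) (target_slug : String), Dom_extract_link_context_py content link target_slug → Spec_extract_link_context_py content link target_slug (extract_link_context_py content link target_slug)

-- ===== LEMMAS AND PROOFS =====

-- reference split: what content.split("\n") produces, as a structural recursion
def pvSp : List Char → List (List Char)
  | [] => [[]]
  | ch :: rest => if ch = '\n' then [] :: pvSp rest else (pvSp rest).modifyHead (ch :: ·)

lemma pvSp_ne_nil_aux : (c : List Char) → pvSp c ≠ []
  | [] => by simp [pvSp]
  | ch :: rest => by
    have ih := pvSp_ne_nil_aux rest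
    simp only [pvSp]
    split
    · simp
    · cases h : pvSp rest with
      | nil => exact absurd h ih
      | cons x xs => simp [List.modifyHead]

lemma pvSp_ne_nil (c : List Char) : pvSp c ≠ [] := pvSp_ne_nil_aux c

lemma pvSplitOn_go (fuel : Nat) (s cur : List Char) (acc : List (List Char)) (h : s.length < fuel) :
    PySem.Chars.splitOn.go ['\n'] fuel s cur acc
      = acc.reverse ++ (pvSp s).modifyHead (cur.reverse ++ ·) := by
  induction fuel generalizing s cur acc with
  | zero => omega
  | succ n ih =>
    cases s with
    | nil => simp [PySem.Chars.splitOn.go, pvSp, List.modifyHead]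
    | cons ch rest =>
      rw [PySem.Chars.splitOn.go]
      simp only [List.length_cons] at h
      by_cases hc : ch = '\n'
      · subst hc
        have hpre : (['\n'].isPrefixOf ('\n' :: rest)) = true := by
          simp [List.isPrefixOf]
        rw [if_pos hpre]
        rw [ih _ _ _ (by simp; omega)]
        cases hsp : pvSp rest with
        | nil => exact absurd hsp (pvSp_ne_nil rest)
        | cons x xs => simp [pvSp, hsp, List.modifyHead]
      · have hpre : (['\n'].isPrefixOf (ch :: rest)) = false := by
          simp [List.isPrefixOf]
          intro hh; exact absurd hh.symm hc
        rw [if_neg (by simp [hpre])]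
        rw [ih _ _ _ (by omega)]
        cases hsp : pvSp rest with
        | nil => exact absurd hsp (pvSp_ne_nil rest)
        | cons x xs =>
          have hc' : ¬ ch = '\n' := hc
          simp [pvSp, hsp, hc', List.modifyHead]

lemma pvSplitOn_eq (c : List Char) : PySem.Chars.splitOn c ['\n'] = pvSp c := by
  rw [PySem.Chars.splitOn, pvSplitOn_go _ _ _ _ (by omega)]
  cases hsp : pvSp c with
  | nil => exact absurd hsp (pvSp_ne_nil c)
  | cons x xs => simp [List.modifyHead]

lemma pvSp_no_nl {c : List Char} (h : '\n' ∉ c) : pvSp c = [c] := by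
  induction c with
  | nil => rfl
  | cons ch rest ih =>
    simp only [List.mem_cons, not_or] at h
    have hch : ¬ ch = '\n' := fun hh => h.1 hh.symm
    simp [pvSp, hch, ih h.2, List.modifyHead]

lemma pvSp_append (a b : List Char) (h : '\n' ∉ a) : pvSp (a ++ '\n' :: b) = a :: pvSp b := by
  induction a with
  | nil => simp [pvSp]
  | cons ch rest ih =>
    simp only [List.mem_cons, not_or] at h
    have hch : ¬ ch = '\n' := fun hh => h.1 hh.symm
    simp [pvSp, hch, ih h.2]

lemma pvFirstSplit {c : List Char} (h : '\n' ∈ c) : ∃ a b, c = a ++ '\n' :: b ∧ '\n' ∉ a := by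
  induction c with
  | nil => cases h
  | cons ch rest ih =>
    by_cases hc : ch = '\n'
    · exact ⟨[], rest, by simp [hc], by simp⟩
    · have : '\n' ∈ rest := by
        rcases List.mem_cons.mp h with h' | h'
        · exact absurd h'.symm hc
        · exact h'
      obtain ⟨a, b, rfl, ha⟩ := ih this
      refine ⟨ch :: a, b, rfl, ?_⟩
      simp only [List.mem_cons, not_or]
      exact ⟨fun hh => hc hh.symm, ha⟩

-- singleton membership/prefix facts
lemma pvIsInSingleton (ch : Char) (s : List Char) :
    PySem.Chars.isIn [ch] s = true ↔ ch ∈ s := by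
  rw [PySem.Chars.isIn_iff_infix]
  constructor
  · intro h; exact h.subset (List.mem_singleton_self _)
  · intro h
    obtain ⟨u, v, rfl⟩ := List.append_of_mem h
    exact ⟨u, v, by simp⟩

lemma pvPfxDropSingleton {y : List Char} {i : Nat} {ch : Char} (h : i < y.length) :
    ([ch] <+: y.drop i) ↔ y[i] = ch := by
  rw [List.drop_eq_getElem_cons h]
  constructor
  · intro hp
    obtain ⟨r, hr⟩ := hp
    rw [List.singleton_append] at hr
    injection hr with h1 _
    exact h1.symm
  · intro hp; subst hp; exact ⟨_, rfl⟩

lemma pvPfxDropNil {y : List Char} {i : Nat} {ch : Char} (h : y.length ≤ i) :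
    ¬ ([ch] <+: y.drop i) := by
  rw [List.drop_eq_nil_of_le h]
  intro hp
  simpa using hp.length_le

-- find characterization: first occurrence determines find
lemma pvFindEq (c l : List Char) (p : Nat) (hp : p ≤ c.length)
    (h1 : l <+: c.drop p) (h2 : ∀ i < p, ¬ l <+: c.drop i) :
    PySem.Chars.find c l = p := by
  have hinf : l <:+: c := by
    obtain ⟨r, hr⟩ := h1
    exact ⟨c.take p, r, by rw [List.append_assoc, hr, List.take_append_drop]⟩
  have hnn : 0 ≤ PySem.Chars.find c l := (PySem.Chars.find_nonneg_iff c l).mpr hinf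
  obtain ⟨hpf, hmin⟩ := PySem.Chars.find_spec hnn
  have hfp : (PySem.Chars.find c l).toNat = p := by
    rcases Nat.lt_trichotomy (PySem.Chars.find c l).toNat p with hlt | heq | hgt
    · exact absurd hpf (h2 _ hlt)
    · exact heq
    · exact absurd h1 (hmin p hgt)
  omega

lemma pvPrefixSplit (a b l : List Char) (d : Char) (i : Nat) (hi : i ≤ a.length)
    (hd : d ∉ l) (h : l <+: (a ++ d :: b).drop i) : l <+: a.drop i := by
  rw [List.drop_append_of_le_length hi] at h
  by_cases hl : l.length ≤ (a.drop i).length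
  · exact (List.isPrefix_append_of_length hl).mp h
  · exfalso
    have hk : (a.drop i).length < l.length := by omega
    have hget := List.IsPrefix.getElem h hk
    have hv : (a.drop i ++ d :: b)[(a.drop i).length]'(by simp) = d := by
      simp
    have hmem : l[(a.drop i).length]'hk ∈ l := List.getElem_mem hk
    rw [hget] at hmem
    simp at hmem
    exact hd hmem

lemma pvFindAppendLeft (a b l : List Char) (hnl : '\n' ∉ l)
    (hin : PySem.Chars.isIn l a = true) :
    PySem.Chars.find (a ++ '\n' :: b) l = PySem.Chars.find a l := by
  rw [PySem.Chars.isIn_iff_infix] at hin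
  have hnn : 0 ≤ PySem.Chars.find a l := (PySem.Chars.find_nonneg_iff a l).mpr hin
  obtain ⟨hpf, hmin⟩ := PySem.Chars.find_spec hnn
  have hle : (PySem.Chars.find a l).toNat ≤ a.length := by
    have := PySem.Chars.find_le_length a l; omega
  have heq := pvFindEq (a ++ '\n' :: b) l (PySem.Chars.find a l).toNat
    (by simp; omega)
    (by rw [List.drop_append_of_le_length hle]
        exact hpf.trans (List.prefix_append _ _))
    (fun i hi hp => hmin i hi (pvPrefixSplit a b l '\n' i (by omega) hnl hp))
  rw [heq, Int.toNat_of_nonneg hnn]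

lemma pvPrefixDropInfix {l x : List Char} {j : Nat} (h : l <+: x.drop j) : l <:+: x := by
  obtain ⟨r, hr⟩ := h
  exact ⟨x.take j, r, by rw [List.append_assoc, hr, List.take_append_drop]⟩

lemma pvDropHigh (a b : List Char) (d : Char) (k : Nat) :
    (a ++ d :: b).drop (a.length + 1 + k) = b.drop k := by
  rw [show a ++ d :: b = (a ++ [d]) ++ b by simp,
      show a.length + 1 + k = (a ++ [d]).length + k by simp,
      List.drop_length_add_append]

lemma pvFindAppendRight (a b l : List Char) (hnl : '\n' ∉ l)
    (hno : PySem.Chars.isIn l a = false) :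
    PySem.Chars.find (a ++ '\n' :: b) l
      = if PySem.Chars.find b l = -1 then -1 else (a.length + 1 : Int) + PySem.Chars.find b l := by
  rw [PySem.Chars.isIn_eq_false_iff] at hno
  by_cases hb : PySem.Chars.find b l = -1
  · rw [if_pos hb]
    rw [PySem.Chars.find_eq_neg_one_iff] at hb ⊢
    intro hinf
    obtain ⟨u, v, huv⟩ := hinf
    have hdrop : l <+: (a ++ '\n' :: b).drop u.length := by
      rw [← huv, show u ++ l ++ v = u ++ (l ++ v) by simp, List.drop_left]
      exact List.prefix_append l v
    by_cases hu : u.length ≤ a.length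
    · exact hno (pvPrefixDropInfix (pvPrefixSplit a b l '\n' u.length hu hnl hdrop))
    · have hsplit : u.length = a.length + 1 + (u.length - a.length - 1) := by omega
      rw [hsplit, pvDropHigh] at hdrop
      exact hb (pvPrefixDropInfix hdrop)
  · rw [if_neg hb]
    have hnn : 0 ≤ PySem.Chars.find b l := by
      have := PySem.Chars.neg_one_le_find b l; omega
    obtain ⟨hpf, hmin⟩ := PySem.Chars.find_spec hnn
    have hle : (PySem.Chars.find b l).toNat ≤ b.length := by
      have := PySem.Chars.find_le_length b l; omega
    have heq := pvFindEq (a ++ '\n' :: b) l (a.length + 1 + (PySem.Chars.find b l).toNat)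
      (by simp; omega)
      (by rw [pvDropHigh]; exact hpf)
      (by
        intro i hi hp
        by_cases hia : i ≤ a.length
        · exact hno (pvPrefixDropInfix (pvPrefixSplit a b l '\n' i hia hnl hp))
        · have hsplit : i = a.length + 1 + (i - a.length - 1) := by omega
          rw [hsplit, pvDropHigh] at hp
          exact hmin _ (by omega) hp)
    rw [heq]
    omega

lemma pvFindNl (a b : List Char) (h : '\n' ∉ a) :
    PySem.Chars.find (a ++ '\n' :: b) ['\n'] = (a.length : Int) := by
  have heq := pvFindEq (a ++ '\n' :: b) ['\n'] a.length (by simp)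
    (by rw [show a.length = a.length + 1 + 0 - 1 by omega]
        rw [show (a ++ '\n' :: b).drop (a.length + 1 + 0 - 1) = '\n' :: b by
          simpa using List.drop_left' (l₁ := a) rfl]
        exact ⟨b, rfl⟩)
    (by
      intro i hi hp
      have hic : i < (a ++ '\n' :: b).length := by simp; omega
      have := (pvPfxDropSingleton hic).mp hp
      rw [List.getElem_append_left hi] at this
      exact h (this ▸ List.getElem_mem hi))
  exact heq

lemma pvFindNlNone (x : List Char) (h : '\n' ∉ x) : PySem.Chars.find x ['\n'] = -1 := by
  rw [PySem.Chars.find_eq_neg_one_iff]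
  intro hin
  exact h (hin.subset (List.mem_singleton_self _))

-- rfind characterization
lemma pvRfindGoNeg (c l : List Char) (j : Nat) (h : ∀ i ≤ j, ¬ l <+: c.drop i) :
    PySem.Chars.rfind.go c l j = -1 := by
  induction j with
  | zero =>
    have hpre : ¬ l.isPrefixOf c = true := by
      rw [List.isPrefixOf_iff_prefix]
      simpa using h 0 (le_refl 0)
    rw [PySem.Chars.rfind.go, if_neg hpre]
  | succ n ih =>
    have hpre : ¬ l.isPrefixOf (c.drop (n+1)) = true := by
      rw [List.isPrefixOf_iff_prefix]
      exact h (n+1) (le_refl _)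
    rw [PySem.Chars.rfind.go, if_neg hpre]
    exact ih (fun i hi => h i (by omega))

lemma pvRfindGoEq (c l : List Char) (j p : Nat) (hp : p ≤ j)
    (h1 : l <+: c.drop p) (h2 : ∀ i, p < i → i ≤ j → ¬ l <+: c.drop i) :
    PySem.Chars.rfind.go c l j = p := by
  induction j with
  | zero =>
    have hp0 : p = 0 := by omega
    subst hp0
    have hpre : l.isPrefixOf c = true := by
      rw [List.isPrefixOf_iff_prefix]
      simpa using h1
    rw [PySem.Chars.rfind.go, if_pos hpre]
    simp
  | succ n ih =>
    by_cases hpn : p = n + 1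
    · subst hpn
      have hpre : l.isPrefixOf (c.drop (n+1)) = true := by
        rw [List.isPrefixOf_iff_prefix]
        exact h1
      rw [PySem.Chars.rfind.go, if_pos hpre]
    · have hpre : ¬ l.isPrefixOf (c.drop (n+1)) = true := by
        rw [List.isPrefixOf_iff_prefix]
        exact h2 (n+1) (by omega) (le_refl _)
      rw [PySem.Chars.rfind.go, if_neg hpre]
      exact ih (by omega) (fun i hi hj => h2 i hi (by omega))

lemma pvRfindNone (x : List Char) (ch : Char) (h : ch ∉ x) :
    PySem.Chars.rfind x [ch] = -1 := by
  rw [PySem.Chars.rfind]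
  apply pvRfindGoNeg
  intro i hi hp
  rcases lt_or_ge i x.length with hlt | hge
  · exact h ((pvPfxDropSingleton hlt).mp hp ▸ List.getElem_mem hlt)
  · exact pvPfxDropNil hge hp

lemma pvLastOcc (y : List Char) (ch : Char) (h : ch ∈ y) :
    ∃ q, q ≤ y.length ∧ ([ch] <+: y.drop q) ∧ ∀ i, q < i → ¬ [ch] <+: y.drop i := by
  induction y with
  | nil => cases h
  | cons d ys ih =>
    by_cases hm : ch ∈ ys
    · obtain ⟨q, hq1, hq2, hq3⟩ := ih hm
      refine ⟨q + 1, by simp; omega, by simpa using hq2, ?_⟩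
      intro i hi hp
      obtain ⟨i', rfl⟩ : ∃ i', i = i' + 1 := ⟨i - 1, by omega⟩
      rw [List.drop_succ_cons] at hp
      exact hq3 i' (by omega) hp
    · have hch : ch = d := by
        rcases List.mem_cons.mp h with h' | h'
        · exact h'
        · exact absurd h' hm
      subst hch
      refine ⟨0, by simp, by rw [List.drop_zero]; exact ⟨ys, rfl⟩, ?_⟩
      intro i hi hp
      obtain ⟨i', rfl⟩ : ∃ i', i = i' + 1 := ⟨i - 1, by omega⟩
      rw [List.drop_succ_cons] at hp
      rcases lt_or_ge i' ys.length with hlt | hge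
      · exact hm ((pvPfxDropSingleton hlt).mp hp ▸ List.getElem_mem hlt)
      · exact pvPfxDropNil hge hp

lemma pvRfindAppend (x y : List Char) (ch : Char) :
    PySem.Chars.rfind (x ++ ch :: y) [ch] = (x.length + 1 : Int) + PySem.Chars.rfind y [ch] := by
  by_cases hm : ch ∈ y
  · obtain ⟨q, hq1, hq2, hq3⟩ := pvLastOcc y ch hm
    have hy : PySem.Chars.rfind y [ch] = (q : Int) := by
      rw [PySem.Chars.rfind]
      exact_mod_cast pvRfindGoEq y [ch] y.length q hq1 hq2 (fun i hi _ => hq3 i hi)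
    have hc : PySem.Chars.rfind (x ++ ch :: y) [ch] = ((x.length + 1 + q : Nat) : Int) := by
      rw [PySem.Chars.rfind]
      refine pvRfindGoEq _ _ _ _ (by simp only [List.length_append, List.length_cons]; omega) ?_ ?_
      · rw [pvDropHigh]; exact hq2
      · intro i hi hj hp
        by_cases hia : i ≤ x.length
        · omega
        · have hsplit : i = x.length + 1 + (i - x.length - 1) := by omega
          rw [hsplit, pvDropHigh] at hp
          exact hq3 _ (by omega) hp
    rw [hc, hy]
    push_cast
    ring
  · have hy : PySem.Chars.rfind y [ch] = -1 := pvRfindNone y ch hm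
    have hc : PySem.Chars.rfind (x ++ ch :: y) [ch] = ((x.length : Nat) : Int) := by
      rw [PySem.Chars.rfind]
      refine pvRfindGoEq _ _ _ _ (by simp only [List.length_append, List.length_cons]; omega) ?_ ?_
      · rw [show x.length = x.length + 1 + 0 - 1 by omega]
        rw [show (x ++ ch :: y).drop (x.length + 1 + 0 - 1) = ch :: y by
          simpa using List.drop_left' (l₁ := x) rfl]
        exact ⟨y, rfl⟩
      · intro i hi hj hp
        have hsplit : i = x.length + 1 + (i - x.length - 1) := by omega
        rw [hsplit, pvDropHigh] at hp
        rcases lt_or_ge (i - x.length - 1) y.length with hlt | hge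
        · exact hm ((pvPfxDropSingleton hlt).mp hp ▸ List.getElem_mem hlt)
        · exact pvPfxDropNil hge hp
    rw [hc, hy]
    omega

lemma pvRfindGoGeNegOne (s sub : List Char) (j : Nat) : -1 ≤ PySem.Chars.rfind.go s sub j := by
  induction j with
  | zero => rw [PySem.Chars.rfind.go]; split <;> omega
  | succ n ih =>
    rw [PySem.Chars.rfind.go]
    split
    · omega
    · exact ih

lemma pvRfindGeNegOne (s sub : List Char) : -1 ≤ PySem.Chars.rfind s sub := by
  rw [PySem.Chars.rfind]; exact pvRfindGoGeNegOne s sub s.length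

-- unfolding the bounded searches B uses
lemma pvRfindFromEq (c sub : List Char) (pos : Int) (h0 : 0 ≤ pos) (h1 : pos ≤ c.length) :
    PySem.Chars.rfindFrom c sub 0 (some pos) = PySem.Chars.rfind (c.take pos.toNat) sub := by
  rw [PySem.Chars.rfindFrom]
  have h2 : ¬ ((c.length : Int) < pos) := by omega
  have h3 : ¬ pos < 0 := by omega
  simp only [h2, h3, if_false, lt_self_iff_false, Int.toNat_zero, List.drop_zero]
  by_cases hr : PySem.Chars.rfind (c.take pos.toNat) sub = -1
  · rw [if_pos hr, hr]
  · rw [if_neg hr]; omega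

lemma pvFindFromEq (c sub : List Char) (pos : Int) (h0 : 0 ≤ pos) (h1 : pos ≤ c.length) :
    PySem.Chars.findFrom c sub pos none
      = (if PySem.Chars.find (c.drop pos.toNat) sub = -1 then -1
         else pos + PySem.Chars.find (c.drop pos.toNat) sub) := by
  rw [PySem.Chars.findFrom]
  have h3 : ¬ pos < 0 := by omega
  have h4 : ¬ ((c.length : Int) < pos) := by omega
  simp only [h3, h4, if_false, Int.toNat_natCast, List.take_length]

-- the per-pattern position B computes
def pvP (c s : List Char) : Int :=
  if PySem.Chars.isIn ['\n'] s then -1 else PySem.Chars.find c s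

def pvLineAt (c : List Char) (pos : Int) : List Char :=
  PySem.List.slice c
    (some (PySem.Chars.rfindFrom c ['\n'] 0 (some pos) + 1))
    (some (if PySem.Chars.findFrom c ['\n'] pos none = -1 then (c.length : Int)
           else PySem.Chars.findFrom c ['\n'] pos none))

lemma pvBcore_eq (c l t : List Char) :
    pvBcore c l t =
      if (if pvP c l = -1 then pvP c t
          else if pvP c t = -1 then pvP c l else min (pvP c l) (pvP c t)) = -1 then []
      else
        PySem.List.slice
          (PySem.Chars.strip
            (pvLineAt c
              (if pvP c l = -1 then pvP c t
               else if pvP c t = -1 then pvP c l else min (pvP c l) (pvP c t)))) none (some 100) := rfl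

lemma pvP_range (c s : List Char) : pvP c s = -1 ∨ (0 ≤ pvP c s ∧ pvP c s ≤ c.length) := by
  unfold pvP
  split
  · left; rfl
  · have h1 := PySem.Chars.neg_one_le_find c s
    have h2 := PySem.Chars.find_le_length c s
    by_cases h : PySem.Chars.find c s = -1
    · left; exact h
    · right; omega

lemma pvP_neg_iff (c s : List Char) (h : '\n' ∉ c) :
    pvP c s = -1 ↔ PySem.Chars.isIn s c = false := by
  unfold pvP
  split
  · rename_i hnl
    have : ('\n') ∈ s := (pvIsInSingleton _ _).mp hnl
    simp only [true_iff]
    rw [PySem.Chars.isIn_eq_false_iff]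
    intro hin
    exact h (hin.subset this)
  · rw [PySem.Chars.find_eq_neg_one_iff, PySem.Chars.isIn_eq_false_iff]

lemma pvP_split (a b s : List Char) (ha : '\n' ∉ a) :
    pvP (a ++ '\n' :: b) s
      = if PySem.Chars.isIn s a then PySem.Chars.find a s
        else (if pvP b s = -1 then -1 else (a.length + 1 : Int) + pvP b s) := by
  unfold pvP
  by_cases hnl : PySem.Chars.isIn ['\n'] s = true
  · have hmem : '\n' ∈ s := (pvIsInSingleton _ _).mp hnl
    have hna : PySem.Chars.isIn s a = false := by
      rw [PySem.Chars.isIn_eq_false_iff]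
      intro hin
      exact ha (hin.subset hmem)
    simp [hnl, hna]
  · have hnl' : '\n' ∉ s := fun hm => hnl ((pvIsInSingleton _ _).mpr hm)
    simp only [if_neg hnl]
    by_cases hin : PySem.Chars.isIn s a = true
    · rw [if_pos hin]
      exact pvFindAppendLeft a b s hnl' hin
    · rw [if_neg hin]
      exact pvFindAppendRight a b s hnl' (by simpa using hin)

lemma pvP_in_a (a s : List Char) (h : PySem.Chars.isIn s a = true) :
    0 ≤ PySem.Chars.find a s ∧ PySem.Chars.find a s ≤ a.length := by
  have h1 := PySem.Chars.find_le_length a s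
  rw [PySem.Chars.isIn_iff_infix] at h
  have h2 := (PySem.Chars.find_nonneg_iff a s).mpr h
  exact ⟨h2, h1⟩

lemma pvSliceShift (a b : List Char) (d : Char) (st e : Int) (hs : 0 ≤ st) (he : 0 ≤ e) :
    PySem.List.slice (a ++ d :: b) (some ((a.length : Int) + 1 + st)) (some ((a.length : Int) + 1 + e))
      = PySem.List.slice b (some st) (some e) := by
  rw [PySem.List.slice_toNat _ (by omega) (by omega), PySem.List.slice_toNat _ hs he]
  have h1 : ((a.length : Int) + 1 + st).toNat = a.length + 1 + st.toNat := by omega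
  rw [h1, pvDropHigh]
  congr 1
  omega

lemma pvLineAtWhole (c : List Char) (h : '\n' ∉ c) (pos : Int) (h0 : 0 ≤ pos)
    (h1 : pos ≤ c.length) : pvLineAt c pos = c := by
  unfold pvLineAt
  rw [pvRfindFromEq c _ pos h0 h1, pvFindFromEq c _ pos h0 h1]
  have hrf : PySem.Chars.rfind (c.take pos.toNat) ['\n'] = -1 :=
    pvRfindNone _ _ (fun hm => h ((List.take_sublist _ _).subset hm))
  have hfd : PySem.Chars.find (c.drop pos.toNat) ['\n'] = -1 :=
    pvFindNlNone _ (fun hm => h ((List.drop_sublist _ _).subset hm))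
  rw [hrf, hfd]
  norm_num

lemma pvLineAtFirst (a b : List Char) (ha : '\n' ∉ a) (pos : Int) (h0 : 0 ≤ pos)
    (h1 : pos ≤ a.length) : pvLineAt (a ++ '\n' :: b) pos = a := by
  have hle : pos ≤ ((a ++ '\n' :: b).length : Int) := by simp; omega
  have hlen : pos.toNat ≤ a.length := by omega
  unfold pvLineAt
  rw [pvRfindFromEq _ _ pos h0 hle, pvFindFromEq _ _ pos h0 hle]
  rw [List.take_append_of_le_length hlen, List.drop_append_of_le_length hlen]
  have hrf : PySem.Chars.rfind (a.take pos.toNat) ['\n'] = -1 :=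
    pvRfindNone _ _ (fun hm => ha ((List.take_sublist _ _).subset hm))
  have hfd : PySem.Chars.find (a.drop pos.toNat ++ '\n' :: b) ['\n'] = ((a.drop pos.toNat).length : Int) :=
    pvFindNl _ _ (fun hm => ha ((List.drop_sublist _ _).subset hm))
  rw [hrf, hfd]
  rw [if_neg (show ¬ (((a.drop pos.toNat).length : Int) = -1) by omega)]
  have hne : ¬ (pos + ((a.drop pos.toNat).length : Int) = -1) := by
    simp only [List.length_drop]
    omega
  rw [if_neg hne]
  have he : pos + ((a.drop pos.toNat).length : Int) = (a.length : Int) := by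
    simp only [List.length_drop]
    omega
  rw [he]
  norm_num

lemma pvLineAtShift (a b : List Char) (q : Int) (h0 : 0 ≤ q) (h1 : q ≤ b.length) :
    pvLineAt (a ++ '\n' :: b) ((a.length : Int) + 1 + q) = pvLineAt b q := by
  have hc0 : 0 ≤ (a.length : Int) + 1 + q := by omega
  have hc1 : (a.length : Int) + 1 + q ≤ ((a ++ '\n' :: b).length : Int) := by simp; omega
  unfold pvLineAt
  rw [pvRfindFromEq _ _ _ hc0 hc1, pvFindFromEq _ _ _ hc0 hc1]
  rw [pvRfindFromEq _ _ _ h0 h1, pvFindFromEq _ _ _ h0 h1]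
  have htk : (a ++ '\n' :: b).take ((a.length : Int) + 1 + q).toNat
      = a ++ '\n' :: b.take q.toNat := by
    have : ((a.length : Int) + 1 + q).toNat = a.length + (1 + q.toNat) := by omega
    rw [this, List.take_length_add_append]
    rw [show 1 + q.toNat = q.toNat + 1 by omega, List.take_succ_cons]
  have hdr : (a ++ '\n' :: b).drop ((a.length : Int) + 1 + q).toNat = b.drop q.toNat := by
    have : ((a.length : Int) + 1 + q).toNat = a.length + 1 + q.toNat := by omega
    rw [this, pvDropHigh]
  rw [htk, hdr, pvRfindAppend]
  have hrb := pvRfindGeNegOne (b.take q.toNat) ['\n']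
  have hfb := PySem.Chars.neg_one_le_find (b.drop q.toNat) ['\n']
  set rb := PySem.Chars.rfind (b.take q.toNat) ['\n'] with hrbdef
  set fb := PySem.Chars.find (b.drop q.toNat) ['\n'] with hfbdef
  have hstart : (a.length : Int) + 1 + rb + 1 = (a.length : Int) + 1 + (rb + 1) := by ring
  rw [hstart]
  have hlc : ((a ++ '\n' :: b).length : Int) = (a.length : Int) + 1 + (b.length : Int) := by
    simp only [List.length_append, List.length_cons]
    push_cast
    ring
  by_cases hf : fb = -1
  · simp only [hf]
    norm_num
    rw [show (a.length : Int) + ((b.length : Int) + 1) = (a.length : Int) + 1 + (b.length : Int) by ring]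
    exact pvSliceShift a b '\n' (rb + 1) (b.length : Int) (by omega) (by omega)
  · simp only [if_neg hf]
    rw [if_neg (show ¬ ((a.length : Int) + 1 + q + fb = -1) by omega),
        if_neg (show ¬ (q + fb = -1) by omega),
        show (a.length : Int) + 1 + q + fb = (a.length : Int) + 1 + (q + fb) by ring]
    exact pvSliceShift a b '\n' (rb + 1) (q + fb) (by omega) (by omega)

-- the single-line (no newline in c) case
lemma pvCoreNoNl (c l t : List Char) (h : '\n' ∉ c) :
    pvLoopA l t (pvSp c) = pvBcore c l t := by
  rw [pvSp_no_nl h, pvBcore_eq]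
  have hiff1 := pvP_neg_iff c l h
  have hiff2 := pvP_neg_iff c t h
  have hr1 := pvP_range c l
  have hr2 := pvP_range c t
  rw [pvLoopA]
  by_cases hb1 : PySem.Chars.isIn l c = true <;> by_cases hb2 : PySem.Chars.isIn t c = true
  · have h1 : ¬ pvP c l = -1 := fun he => by
      have := hiff1.mp he; rw [this] at hb1; cases hb1
    have h2 : ¬ pvP c t = -1 := fun he => by
      have := hiff2.mp he; rw [this] at hb2; cases hb2
    have hne : ¬ (if pvP c l = -1 then pvP c t else if pvP c t = -1 then pvP c l
        else min (pvP c l) (pvP c t)) = -1 := by split_ifs <;> omega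
    have h0' : 0 ≤ (if pvP c l = -1 then pvP c t else if pvP c t = -1 then pvP c l
        else min (pvP c l) (pvP c t)) := by split_ifs <;> omega
    have hl' : (if pvP c l = -1 then pvP c t else if pvP c t = -1 then pvP c l
        else min (pvP c l) (pvP c t)) ≤ (c.length : Int) := by split_ifs <;> omega
    rw [if_neg hne, pvLineAtWhole c h _ h0' hl', if_pos (by simp [hb1])]
  · have h1 : ¬ pvP c l = -1 := fun he => by
      have := hiff1.mp he; rw [this] at hb1; cases hb1
    have h2 : pvP c t = -1 := hiff2.mpr (by simpa using hb2)
    have hne : ¬ (if pvP c l = -1 then pvP c t else if pvP c t = -1 then pvP c l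
        else min (pvP c l) (pvP c t)) = -1 := by split_ifs <;> omega
    have h0' : 0 ≤ (if pvP c l = -1 then pvP c t else if pvP c t = -1 then pvP c l
        else min (pvP c l) (pvP c t)) := by split_ifs <;> omega
    have hl' : (if pvP c l = -1 then pvP c t else if pvP c t = -1 then pvP c l
        else min (pvP c l) (pvP c t)) ≤ (c.length : Int) := by split_ifs <;> omega
    rw [if_neg hne, pvLineAtWhole c h _ h0' hl', if_pos (by simp [hb1])]
  · have h1 : pvP c l = -1 := hiff1.mpr (by simpa using hb1)
    have h2 : ¬ pvP c t = -1 := fun he => by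
      have := hiff2.mp he; rw [this] at hb2; cases hb2
    have hne : ¬ (if pvP c l = -1 then pvP c t else if pvP c t = -1 then pvP c l
        else min (pvP c l) (pvP c t)) = -1 := by split_ifs <;> omega
    have h0' : 0 ≤ (if pvP c l = -1 then pvP c t else if pvP c t = -1 then pvP c l
        else min (pvP c l) (pvP c t)) := by split_ifs <;> omega
    have hl' : (if pvP c l = -1 then pvP c t else if pvP c t = -1 then pvP c l
        else min (pvP c l) (pvP c t)) ≤ (c.length : Int) := by split_ifs <;> omega
    rw [if_neg hne, pvLineAtWhole c h _ h0' hl', if_pos (by simp [hb2])]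
  · have h1 : pvP c l = -1 := hiff1.mpr (by simpa using hb1)
    have h2 : pvP c t = -1 := hiff2.mpr (by simpa using hb2)
    rw [if_neg (by simp [hb1, hb2] : ¬ (PySem.Chars.isIn l c || PySem.Chars.isIn t c) = true)]
    rw [h1, h2]
    simp [pvLoopA]

lemma pvSelShift (x q1 q2 : Int) (hx : 1 ≤ x) (h1 : q1 = -1 ∨ 0 ≤ q1) (h2 : q2 = -1 ∨ 0 ≤ q2) :
    (if (if q1 = -1 then -1 else x + q1) = -1 then (if q2 = -1 then -1 else x + q2)
     else if (if q2 = -1 then -1 else x + q2) = -1 then (if q1 = -1 then -1 else x + q1)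
     else min (if q1 = -1 then -1 else x + q1) (if q2 = -1 then -1 else x + q2))
    = (if (if q1 = -1 then q2 else if q2 = -1 then q1 else min q1 q2) = -1 then -1
       else x + (if q1 = -1 then q2 else if q2 = -1 then q1 else min q1 q2)) := by
  split_ifs <;> omega

lemma pvIfShift {α : Type} (x pb : Int) (hx : 1 ≤ x) (hpb : pb = -1 ∨ 0 ≤ pb)
    (f : Int → α) (z : α) :
    (if (if pb = -1 then -1 else x + pb) = -1 then z else f (if pb = -1 then -1 else x + pb))
    = (if pb = -1 then z else f (x + pb)) := by
  rcases hpb with h | h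
  · simp [h]
  · have hne : ¬ pb = -1 := by omega
    rw [if_neg hne, if_neg (by omega : ¬ x + pb = -1), if_neg hne]

-- the main induction
lemma pvCoreAux : ∀ n, ∀ c : List Char, c.length ≤ n → ∀ l t,
    pvLoopA l t (pvSp c) = pvBcore c l t := by
  intro n
  induction n with
  | zero =>
    intro c hc l t
    have hcnil : c = [] := List.length_eq_zero_iff.mp (by omega)
    subst hcnil
    exact pvCoreNoNl [] l t (by simp)
  | succ n ih =>
    intro c hc l t
    by_cases hm : '\n' ∈ c
    · obtain ⟨a, b, rfl, ha⟩ := pvFirstSplit hm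
      have hlb : b.length ≤ n := by
        simp only [List.length_append, List.length_cons] at hc
        omega
      have hrl := pvP_range b l
      have hrt := pvP_range b t
      rw [pvSp_append a b ha, pvBcore_eq, pvP_split a b l ha, pvP_split a b t ha, pvLoopA]
      by_cases hb1 : PySem.Chars.isIn l a = true <;> by_cases hb2 : PySem.Chars.isIn t a = true
      · rw [if_pos hb1, if_pos hb2]
        have hf1 := pvP_in_a a l hb1
        have hf2 := pvP_in_a a t hb2
        have hne : ¬ (if PySem.Chars.find a l = -1 then PySem.Chars.find a t
            else if PySem.Chars.find a t = -1 then PySem.Chars.find a l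
            else min (PySem.Chars.find a l) (PySem.Chars.find a t)) = -1 := by
          split_ifs <;> omega
        have h0' : 0 ≤ (if PySem.Chars.find a l = -1 then PySem.Chars.find a t
            else if PySem.Chars.find a t = -1 then PySem.Chars.find a l
            else min (PySem.Chars.find a l) (PySem.Chars.find a t)) := by
          split_ifs <;> omega
        have hl' : (if PySem.Chars.find a l = -1 then PySem.Chars.find a t
            else if PySem.Chars.find a t = -1 then PySem.Chars.find a l
            else min (PySem.Chars.find a l) (PySem.Chars.find a t)) ≤ (a.length : Int) := by
          split_ifs <;> omega
        rw [if_neg hne, pvLineAtFirst a b ha _ h0' hl', if_pos (by simp [hb1])]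
      · rw [if_pos hb1, if_neg hb2]
        have hf1 := pvP_in_a a l hb1
        have hne : ¬ (if PySem.Chars.find a l = -1
            then (if pvP b t = -1 then -1 else (a.length : Int) + 1 + pvP b t)
            else if (if pvP b t = -1 then -1 else (a.length : Int) + 1 + pvP b t) = -1
            then PySem.Chars.find a l
            else min (PySem.Chars.find a l)
              (if pvP b t = -1 then -1 else (a.length : Int) + 1 + pvP b t)) = -1 := by
          split_ifs <;> omega
        have h0' : 0 ≤ (if PySem.Chars.find a l = -1
            then (if pvP b t = -1 then -1 else (a.length : Int) + 1 + pvP b t)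
            else if (if pvP b t = -1 then -1 else (a.length : Int) + 1 + pvP b t) = -1
            then PySem.Chars.find a l
            else min (PySem.Chars.find a l)
              (if pvP b t = -1 then -1 else (a.length : Int) + 1 + pvP b t)) := by
          split_ifs <;> omega
        have hl' : (if PySem.Chars.find a l = -1
            then (if pvP b t = -1 then -1 else (a.length : Int) + 1 + pvP b t)
            else if (if pvP b t = -1 then -1 else (a.length : Int) + 1 + pvP b t) = -1
            then PySem.Chars.find a l
            else min (PySem.Chars.find a l)
              (if pvP b t = -1 then -1 else (a.length : Int) + 1 + pvP b t)) ≤ (a.length : Int) := by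
          split_ifs <;> omega
        rw [if_neg hne, pvLineAtFirst a b ha _ h0' hl', if_pos (by simp [hb1])]
      · rw [if_neg hb1, if_pos hb2]
        have hf2 := pvP_in_a a t hb2
        have hne : ¬ (if (if pvP b l = -1 then -1 else (a.length : Int) + 1 + pvP b l) = -1
            then PySem.Chars.find a t
            else if PySem.Chars.find a t = -1
            then (if pvP b l = -1 then -1 else (a.length : Int) + 1 + pvP b l)
            else min (if pvP b l = -1 then -1 else (a.length : Int) + 1 + pvP b l)
              (PySem.Chars.find a t)) = -1 := by
          split_ifs <;> omega
        have h0' : 0 ≤ (if (if pvP b l = -1 then -1 else (a.length : Int) + 1 + pvP b l) = -1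
            then PySem.Chars.find a t
            else if PySem.Chars.find a t = -1
            then (if pvP b l = -1 then -1 else (a.length : Int) + 1 + pvP b l)
            else min (if pvP b l = -1 then -1 else (a.length : Int) + 1 + pvP b l)
              (PySem.Chars.find a t)) := by
          split_ifs <;> omega
        have hl' : (if (if pvP b l = -1 then -1 else (a.length : Int) + 1 + pvP b l) = -1
            then PySem.Chars.find a t
            else if PySem.Chars.find a t = -1
            then (if pvP b l = -1 then -1 else (a.length : Int) + 1 + pvP b l)
            else min (if pvP b l = -1 then -1 else (a.length : Int) + 1 + pvP b l)
              (PySem.Chars.find a t)) ≤ (a.length : Int) := by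
          split_ifs <;> omega
        rw [if_neg hne, pvLineAtFirst a b ha _ h0' hl', if_pos (by simp [hb2])]
      · rw [if_neg hb1, if_neg hb2]
        rw [if_neg (by simp [hb1, hb2] :
          ¬ (PySem.Chars.isIn l a || PySem.Chars.isIn t a) = true)]
        rw [ih b hlb l t, pvBcore_eq]
        rw [pvSelShift ((a.length : Int) + 1) (pvP b l) (pvP b t) (by omega)
          (by omega) (by omega)]
        rw [pvIfShift ((a.length : Int) + 1)
          (if pvP b l = -1 then pvP b t else if pvP b t = -1 then pvP b l
           else min (pvP b l) (pvP b t)) (by omega)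
          (by split_ifs <;> omega)
          (fun p => PySem.List.slice (PySem.Chars.strip (pvLineAt (a ++ '\n' :: b) p)) none (some 100))
          []]
        by_cases hpb : (if pvP b l = -1 then pvP b t else if pvP b t = -1 then pvP b l
            else min (pvP b l) (pvP b t)) = -1
        · rw [if_pos hpb, if_pos hpb]
        · have hge : 0 ≤ (if pvP b l = -1 then pvP b t else if pvP b t = -1 then pvP b l
              else min (pvP b l) (pvP b t)) := by split_ifs <;> omega
          have hleb : (if pvP b l = -1 then pvP b t else if pvP b t = -1 then pvP b l
              else min (pvP b l) (pvP b t)) ≤ (b.length : Int) := by split_ifs <;> omega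
          rw [if_neg hpb, if_neg hpb, pvLineAtShift a b _ hge hleb]
    · exact pvCoreNoNl c l t hm

theorem pvCore (c l t : List Char) : pvLoopA l t (pvSp c) = pvBcore c l t :=
  pvCoreAux c.length c le_rfl l t

-- ===== VERDICT (by name: the statement is the Claim_ definition above) =====
theorem extract_link_context_py_spec : Claim_equal_extract_link_context_py := by
  intro content link target_slug _
  unfold Spec_extract_link_context_py extract_link_context_py extract_link_context_py_alt
  rw [pvSplitOn_eq, pvCore]
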